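-- pv_equiv track=rewrite | github.com/divinenaman/basic-coding-lib | Array/partitions.py | solve
-- ===== SOURCE A (Python) =====
-- def solve(A, B):
--
--     sum_total = sum(B)
--
--     if sum_total % 3 != 0:
--         return 0
--
--     s = sum_total // 3
--     s_twice = 2 * s
--
--     prefix = 0
--     temp = 0
--     count = 0
--     for i in range(A-1):
--         temp += B[i]
--
--         if temp == s:
--             prefix += 1
--
--         if temp == s_twice:
--             count += prefix
--
--     return count
-- ===== SOURCE B (Python) =====
-- def solve(A, B):
--     total = sum(B)
--     if total % 3 != 0:
--         return 0
--     s = total // 3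
--     s2 = 2 * s
--
--     # materialise the prefix sums of the scanned region
--     t = 0
--     prefixes = []
--     for x in B[:max(A - 1, 0)]:
--         t += x
--         prefixes.append(t)
--
--     # walk them backwards: each s-prefix pairs with every 2s-prefix at or after it
--     count = 0
--     cnt2 = 0
--     for p in reversed(prefixes):
--         if p == s2:
--             cnt2 += 1
--         if p == s:
--             count += cnt2
--     return count
-- ===== Notes on version B (the rewrite author's own statement) =====
-- stated objective: alternative
-- what changed: Replaces A's single indexed pass carrying a running count of s-prefixes by a staged computation: first materialise the prefix-sum list of the scanned region via slicing, then traverse it in reverse keeping a suffix count of 2s-positions and crediting each s-position with it; same O(n) cost, opposite traversal direction and different state.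
import Mathlib
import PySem

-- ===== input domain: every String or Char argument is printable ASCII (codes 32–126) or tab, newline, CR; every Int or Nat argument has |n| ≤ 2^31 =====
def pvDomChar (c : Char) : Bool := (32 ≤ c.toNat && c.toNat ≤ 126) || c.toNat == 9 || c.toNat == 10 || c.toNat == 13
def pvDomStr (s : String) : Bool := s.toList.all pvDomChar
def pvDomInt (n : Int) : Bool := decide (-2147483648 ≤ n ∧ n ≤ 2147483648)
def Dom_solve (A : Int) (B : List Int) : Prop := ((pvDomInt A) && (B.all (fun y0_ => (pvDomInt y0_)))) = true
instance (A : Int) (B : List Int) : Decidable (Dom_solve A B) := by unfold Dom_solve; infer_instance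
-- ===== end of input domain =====

-- B materialises the prefix-sum list of the scanned region and walks it in REVERSE with a
-- suffix count of 2s-positions, instead of A's forward indexed pass carrying a running
-- count of s-prefixes; same cost, different traversal and state (objective: alternative).

-- ===== PORT A =====
def solve (A : Int) (B : List Int) : Int :=
  let sum_total := B.sum
  if PySem.Int.mod sum_total 3 ≠ 0 then 0
  else
    let s := PySem.Int.floordiv sum_total 3
    let s_twice := 2 * s
    let st := (PySem.List.pyRange 0 (A - 1) 1).foldl
      (fun (st : Int × Int × Int) i =>
        let temp := st.1 + PySem.List.pyGetD B i 0
        let pfx := if temp = s then st.2.1 + 1 else st.2.1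
        let count := if temp = s_twice then st.2.2 + pfx else st.2.2
        (temp, pfx, count)) (0, 0, 0)
    st.2.2

-- ===== PORT B =====
def solve_alt (A : Int) (B : List Int) : Int :=
  let total := B.sum
  if PySem.Int.mod total 3 ≠ 0 then 0
  else
    let s := PySem.Int.floordiv total 3
    let s2 := 2 * s
    -- prefix sums of the sliced region, built by appending
    let pr := (PySem.List.slice B none (some (max (A - 1) 0))).foldl
      (fun (st : Int × List Int) x => (st.1 + x, st.2 ++ [st.1 + x])) (0, [])
    -- reverse walk: suffix count of 2s-positions, credited at each s-position
    let res := pr.2.reverse.foldl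
      (fun (st : Int × Int) p =>
        let cnt2 := if p = s2 then st.1 + 1 else st.1
        (cnt2, if p = s then st.2 + cnt2 else st.2)) (0, 0)
    res.2

-- ===== PRECONDITION & SPEC =====
-- A raises IndexError exactly when it reaches the loop (sum(B) divisible by 3) and A - 1 > len(B).
def Pre_solve (A : Int) (B : List Int) : Prop :=
  PySem.Int.mod B.sum 3 ≠ 0 ∨ A - 1 ≤ (B.length : Int)
instance (A : Int) (B : List Int) : Decidable (Pre_solve A B) := by unfold Pre_solve; infer_instance

def pvWitness_solve : Int × List Int := (6, [1, 2, 3, 0, 3, 3])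

def Spec_solve (A : Int) (B : List Int) (out : Int) : Prop := out = solve_alt A B
instance (A : Int) (B : List Int) (out : Int) : Decidable (Spec_solve A B out) := by unfold Spec_solve; infer_instance

-- ===== CLAIM (what is proved, stated in full; the proofs are below) =====
def Claim_equal_solve : Prop := ∀ (A : Int) (B : List Int), Dom_solve A B → Pre_solve A B → Spec_solve A B (solve A B)

-- ===== LEMMAS AND PROOFS =====

-- number of prefix positions of xs (starting from running sum t) whose running sum equals s2
def pvCnt2 (s2 : Int) : List Int → Int → Int
  | [], _ => 0
  | x :: xs, t => (if t + x = s2 then 1 else 0) + pvCnt2 s2 xs (t + x)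

-- pair count: each s-position paired with every s2-position at or after it
def pvG (s s2 : Int) : List Int → Int → Int
  | [], _ => 0
  | x :: xs, t => (if t + x = s then pvCnt2 s2 (x :: xs) t else 0) + pvG s s2 xs (t + x)

-- the prefix-sum list starting from running sum t
def pvPfx (t : Int) : List Int → List Int
  | [] => []
  | x :: xs => (t + x) :: pvPfx (t + x) xs

lemma foldl_range_getD_take {σ : Type} (f : σ → Int → σ) (B : List Int) (m : Nat)
    (h : m ≤ B.length) (init : σ) :
    (List.range m).foldl (fun (st : σ) (k : Nat) => f st (PySem.List.pyGetD B ((0 : Int) + (k : Int)) 0)) init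
      = (B.take m).foldl f init := by
  induction m with
  | zero => simp
  | succ m ih =>
      have hm : m < B.length := by omega
      rw [List.range_succ, List.foldl_append, ih (by omega), List.take_add_one, List.foldl_append]
      simp [PySem.List.pyGetD_natCast, List.getD, List.getElem?_eq_getElem hm]

lemma foldl_pyRange_getD_take {σ : Type} (f : σ → Int → σ) (B : List Int) (n : Int)
    (h : n ≤ (B.length : Int)) (init : σ) :
    (PySem.List.pyRange 0 n 1).foldl (fun st i => f st (PySem.List.pyGetD B i 0)) init
      = (B.take n.toNat).foldl f init := by
  rw [PySem.List.pyRange_one, List.foldl_map]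
  have h0 : (n - 0).toNat = n.toNat := by omega
  rw [h0]
  exact foldl_range_getD_take f B n.toNat (by omega) init

lemma loopA_eq (s s2 : Int) (xs : List Int) : ∀ (t p c : Int),
    (xs.foldl (fun (st : Int × Int × Int) x =>
        (st.1 + x,
         if st.1 + x = s then st.2.1 + 1 else st.2.1,
         if st.1 + x = s2 then st.2.2 + (if st.1 + x = s then st.2.1 + 1 else st.2.1) else st.2.2))
      (t, p, c)).2.2
      = c + p * pvCnt2 s2 xs t + pvG s s2 xs t := by
  induction xs with
  | nil => intro t p c; simp [pvCnt2, pvG]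
  | cons x xs ih =>
      intro t p c
      simp only [List.foldl_cons, ih, pvCnt2, pvG]
      split_ifs <;> ring

lemma buildPfx (xs : List Int) : ∀ (t : Int) (l : List Int),
    (xs.foldl (fun (st : Int × List Int) x => (st.1 + x, st.2 ++ [st.1 + x])) (t, l)).2
      = l ++ pvPfx t xs := by
  induction xs with
  | nil => intro t l; simp [pvPfx]
  | cons x xs ih =>
      intro t l
      simp only [List.foldl_cons, ih, pvPfx, List.append_assoc, List.singleton_append]

lemma revWalk (s s2 : Int) (xs : List Int) : ∀ (t : Int),
    (pvPfx t xs).foldr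
        (fun p (st : Int × Int) =>
          let cnt2 := if p = s2 then st.1 + 1 else st.1
          (cnt2, if p = s then st.2 + cnt2 else st.2)) (0, 0)
      = (pvCnt2 s2 xs t, pvG s s2 xs t) := by
  induction xs with
  | nil => intro t; simp [pvPfx, pvCnt2, pvG]
  | cons x xs ih =>
      intro t
      simp only [pvPfx, List.foldr_cons, ih, pvCnt2, pvG]
      split_ifs <;> simp only [Prod.mk.injEq] <;> constructor <;> ring

-- ===== VERDICT (by name: the statement is the Claim_ definition above) =====
theorem solve_spec : Claim_equal_solve := by
  intro A B _ hpre
  unfold Spec_solve solve solve_alt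
  by_cases hmod : PySem.Int.mod B.sum 3 ≠ 0
  · simp only [if_pos hmod]
  · simp only [if_neg hmod]
    have hn : A - 1 ≤ (B.length : Int) := hpre.resolve_left hmod
    have hmax : (0 : Int) ≤ max (A - 1) 0 := le_max_right _ _
    have htn : (max (A - 1) 0).toNat = (A - 1).toNat := by omega
    rw [foldl_pyRange_getD_take
          (fun (st : Int × Int × Int) x =>
            (st.1 + x,
             if st.1 + x = PySem.Int.floordiv B.sum 3 then st.2.1 + 1 else st.2.1,
             if st.1 + x = 2 * PySem.Int.floordiv B.sum 3 then
               st.2.2 + (if st.1 + x = PySem.Int.floordiv B.sum 3 then st.2.1 + 1 else st.2.1)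
             else st.2.2)) B (A - 1) hn,
        PySem.List.slice_to B hmax, htn]
    rw [loopA_eq, buildPfx, List.nil_append, List.foldl_reverse, revWalk]
    ring
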